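-- pv_equiv track=rewrite | github.com/smpineda129/romanos | f_romanos.py | to_groups_roman
-- ===== SOURCE A (Python) =====
-- def to_groups_roman(romano: str) -> list:
--     groups = []
--     grupo = ""
--     i = 0
--
--     while i < len(romano):
--         if romano[i] != "*":
--             grupo += romano[i]
--             i += 1
--         else:
--             count_stars = 0
--             while i < len(romano) and romano[i] == "*":
--                 count_stars += 1
--                 i += 1
--             if grupo and count_stars > 0:
--                 groups.append((grupo, count_stars))
--                 grupo = ""
--
--     return groups
-- ===== SOURCE B (Python) =====
-- def to_groups_roman(romano: str) -> list:
--     # phase 1: split the string into maximal runs of stars / non-stars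
--     runs = []
--     i = 0
--     n = len(romano)
--     while i < n:
--         star = romano[i] == "*"
--         j = i + 1
--         while j < n and (romano[j] == "*") == star:
--             j += 1
--         runs.append((star, romano[i:j], j - i))
--         i = j
--     # phase 2: each non-star run followed by a (star) run yields a group
--     out = []
--     for (star, text, _), (_, _, count) in zip(runs, runs[1:]):
--         if not star:
--             out.append((text, count))
--     return out
-- ===== Notes on version B (the rewrite author's own statement) =====
-- stated objective: faster
-- what changed: B replaces A's index-walk with interleaved accumulator state (building each group by repeated string concatenation, quadratic in run length) by a two-phase pass: split the string into maximal star/non-star runs taken by slicing, then pair each non-star run with the following star run over zip(runs, runs[1:]).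
import Mathlib
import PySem

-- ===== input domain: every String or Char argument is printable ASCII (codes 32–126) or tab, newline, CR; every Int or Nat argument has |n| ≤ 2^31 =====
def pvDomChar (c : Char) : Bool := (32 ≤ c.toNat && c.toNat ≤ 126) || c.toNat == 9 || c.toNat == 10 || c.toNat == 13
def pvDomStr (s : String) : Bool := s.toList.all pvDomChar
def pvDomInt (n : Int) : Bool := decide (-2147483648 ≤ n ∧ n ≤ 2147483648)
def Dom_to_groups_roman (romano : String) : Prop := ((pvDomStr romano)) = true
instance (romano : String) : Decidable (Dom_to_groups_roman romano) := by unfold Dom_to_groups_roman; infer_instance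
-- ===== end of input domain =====

-- B replaces A's index-walk, which builds groups by repeated string concatenation, by a
-- two-phase pass: slice maximal star/non-star runs, then pair adjacent runs (measured faster).

-- ===== PORT A =====
-- inner 'while i < len(romano) and romano[i] == "*"': counts leading stars, returns the rest
def starsA : List Char → Int × List Char
  | [] => (0, [])
  | c :: cs => if c = '*' then let p := starsA cs; (p.1 + 1, p.2) else (0, c :: cs)

theorem starsA_length_le : ∀ (l : List Char), (starsA l).2.length ≤ l.length := by
  intro l; induction l with
  | nil => simp [starsA]
  | cons c cs ih => simp only [starsA]; split <;> simp <;> omega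

def loopA : List Char → List Char → List (String × Int) → List (String × Int)
  | [], _, groups => groups
  | c :: rest, grupo, groups =>
    if c ≠ '*' then loopA rest (grupo ++ [c]) groups
    else
      let p := starsA (c :: rest)
      if grupo ≠ [] ∧ 0 < p.1 then loopA p.2 [] (groups ++ [(String.mk grupo, p.1)])
      else loopA p.2 grupo groups
  termination_by cs _ _ => cs.length
  decreasing_by
    · simp
    all_goals
      have hc : c = '*' := by simp_all
      simp only [starsA, if_pos hc, List.length_cons]
      exact Nat.lt_succ_of_le (starsA_length_le rest)

def to_groups_roman (romano : String) : List (String × Int) :=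
  loopA romano.toList [] []

-- ===== PORT B =====
-- inner 'while j < n and (romano[j] == "*") == star': the rest of the current run
def takeRun (star : Bool) : List Char → List Char × List Char
  | [] => ([], [])
  | c :: cs =>
    if (c == '*') = star then let p := takeRun star cs; (c :: p.1, p.2)
    else ([], c :: cs)

theorem takeRun_length_le (star : Bool) : ∀ (l : List Char), (takeRun star l).2.length ≤ l.length := by
  intro l; induction l with
  | nil => simp [takeRun]
  | cons c cs ih => simp only [takeRun]; split <;> simp <;> omega

-- phase 1: maximal runs as (is_star, text, length)
def runsB : List Char → List (Bool × String × Int)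
  | [] => []
  | c :: cs =>
    let star := c == '*'
    let p := takeRun star cs
    (star, String.mk (c :: p.1), ((c :: p.1).length : Int)) :: runsB p.2
  termination_by l => l.length
  decreasing_by
    simp only [List.length_cons]
    exact Nat.lt_succ_of_le (takeRun_length_le _ cs)

-- phase 2: 'for …, … in zip(runs, runs[1:])'
def pairB : List (Bool × String × Int) → List (String × Int)
  | (star, text, _) :: (b, t, count) :: rest =>
    if star then pairB ((b, t, count) :: rest)
    else (text, count) :: pairB ((b, t, count) :: rest)
  | _ => []

def to_groups_roman_alt (romano : String) : List (String × Int) :=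
  pairB (runsB romano.toList)

-- ===== PRECONDITION & SPEC =====
def Spec_to_groups_roman (romano : String) (out : List (String × Int)) : Prop := out = to_groups_roman_alt romano
instance (romano : String) (out : List (String × Int)) : Decidable (Spec_to_groups_roman romano out) := by unfold Spec_to_groups_roman; infer_instance

-- ===== CLAIM (what is proved, stated in full; the proofs are below) =====
def Claim_equal_to_groups_roman : Prop := ∀ (romano : String), Dom_to_groups_roman romano → Spec_to_groups_roman romano (to_groups_roman romano)

-- ===== LEMMAS AND PROOFS =====

theorem takeRun_all (b : Bool) : ∀ (l : List Char), (∀ x ∈ l, (x == '*') = b) → takeRun b l = (l, []) := by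
  intro l; induction l with
  | nil => simp [takeRun]
  | cons c cs ih =>
    intro h
    simp only [takeRun, if_pos (h c (by simp))]
    rw [ih (fun x hx => h x (by simp [hx]))]

theorem takeRun_eat (b : Bool) : ∀ (l : List Char) (c : Char) (rest : List Char),
    (∀ x ∈ l, (x == '*') = b) → (c == '*') ≠ b → takeRun b (l ++ c :: rest) = (l, c :: rest) := by
  intro l; induction l with
  | nil => intro c rest _ hc; simp only [List.nil_append, takeRun]; rw [if_neg hc]
  | cons a l' ih =>
    intro c rest h hc
    simp only [List.cons_append, takeRun, if_pos (h a (by simp))]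
    rw [ih c rest (fun x hx => h x (by simp [hx])) hc]

theorem starsA_eq : ∀ (l : List Char),
    starsA l = (((takeRun true l).1.length : Int), (takeRun true l).2) := by
  intro l; induction l with
  | nil => simp [starsA, takeRun]
  | cons c cs ih =>
    by_cases hc : c = '*'
    · simp only [starsA, if_pos hc, takeRun, ih]
      simp [hc]
    · simp [starsA, takeRun, hc]

theorem runs_single : ∀ (g : List Char), g ≠ [] → (∀ x ∈ g, (x == '*') = false) →
    runsB g = [(false, String.mk g, (g.length : Int))] := by
  intro g hne h
  cases g with
  | nil => exact absurd rfl hne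
  | cons a g' =>
    rw [runsB]
    have ha : (a == '*') = false := h a (by simp)
    rw [ha, takeRun_all false g' (fun x hx => h x (by simp [hx]))]
    simp [runsB]

theorem runs_prefix : ∀ (g : List Char) (c : Char) (rest : List Char), g ≠ [] →
    (∀ x ∈ g, (x == '*') = false) → (c == '*') = true →
    runsB (g ++ c :: rest) = (false, String.mk g, (g.length : Int)) :: runsB (c :: rest) := by
  intro g c rest hne h hc
  cases g with
  | nil => exact absurd rfl hne
  | cons a g' =>
    rw [List.cons_append, runsB]
    have ha : (a == '*') = false := h a (by simp)
    rw [ha, takeRun_eat false g' c rest (fun x hx => h x (by simp [hx])) (by simp [hc])]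

theorem pairB_star : ∀ (s : String) (n : Int) (l : List (Bool × String × Int)),
    pairB ((true, s, n) :: l) = pairB l := by
  intro s n l
  cases l with
  | nil => rfl
  | cons y r => cases y with | mk b p => cases p with | mk t m => simp [pairB]

theorem pairB_runs_nonstar : ∀ (g : List Char), (∀ x ∈ g, (x == '*') = false) →
    pairB (runsB g) = [] := by
  intro g h
  cases hg : g with
  | nil => simp [runsB, pairB]
  | cons a g' => rw [← hg, runs_single g (by simp [hg]) h]; rfl

theorem keyAux : ∀ (n : Nat) (cs : List Char), cs.length ≤ n →
    ∀ (grupo : List Char) (groups : List (String × Int)), (∀ x ∈ grupo, (x == '*') = false) →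
    loopA cs grupo groups = groups ++ pairB (runsB (grupo ++ cs)) := by
  intro n
  induction n with
  | zero =>
    intro cs hlen grupo groups hg
    have : cs = [] := List.length_eq_zero_iff.mp (Nat.le_zero.mp hlen)
    subst this
    simp only [loopA, List.append_nil]
    rw [pairB_runs_nonstar grupo hg, List.append_nil]
  | succ n ih =>
    intro cs hlen grupo groups hg
    cases cs with
    | nil =>
      simp only [loopA, List.append_nil]
      rw [pairB_runs_nonstar grupo hg, List.append_nil]
    | cons c rest =>
      simp only [List.length_cons, Nat.succ_le_succ_iff] at hlen
      by_cases hc : c = '*'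
      · -- star branch
        rw [loopA]
        rw [if_neg (by simp [hc])]
        have hsr := starsA_eq rest
        have hstar : starsA (c :: rest) =
            ((((takeRun true rest).1.length : Int) + 1), (takeRun true rest).2) := by
          rw [starsA, if_pos hc, hsr]
        set t := (takeRun true rest).1 with ht
        set r := (takeRun true rest).2 with hr
        have hrlen : r.length ≤ n := le_trans (hr ▸ takeRun_length_le true rest) hlen
        have hruns : runsB (c :: rest) =
            (true, String.mk (c :: t), (((c :: t).length : Nat) : Int)) :: runsB r := by
          rw [runsB, show (c == '*') = true by simp [hc]]
        by_cases hgr : grupo = []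
        · subst hgr
          rw [if_neg (fun h => h.1 rfl)]
          simp only [hstar]
          rw [ih r hrlen [] groups (by intro x hx; simp at hx)]
          simp only [List.nil_append, hruns, pairB_star]
        · rw [if_pos ⟨hgr, by simp only [hstar]; omega⟩]
          simp only [hstar]
          rw [ih r hrlen [] _ (by intro x hx; simp at hx)]
          rw [runs_prefix grupo c rest hgr hg (by simp [hc]), hruns]
          simp only [List.nil_append, pairB, pairB_star]
          push_cast
          simp [List.append_assoc]
      · -- non-star branch
        rw [loopA, if_pos hc]
        rw [ih rest hlen (grupo ++ [c]) groups
            (by intro x hx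
                rcases List.mem_append.mp hx with h1 | h1
                · exact hg x h1
                · simp at h1; subst h1; simp [hc])]
        rw [List.append_assoc]
        rfl

-- ===== VERDICT (by name: the statement is the Claim_ definition above) =====
theorem to_groups_roman_spec : Claim_equal_to_groups_roman := by
  intro romano _
  unfold Spec_to_groups_roman to_groups_roman to_groups_roman_alt
  rw [keyAux romano.toList.length romano.toList le_rfl [] [] (by simp)]
  simp
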